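-- pv_equiv track=rewrite | github.com/gecos-lab/PZero | pzero/three_d_surfaces.py | _make_fault_group_name
-- ===== SOURCE A (Python) =====
-- def _make_fault_group_name(feature, scenario, fallback_name="fault"):
--     """Create a stable LoopStructural feature name for a merged fault group."""
--
--     def _clean(value):
--         text = str(value).strip()
--         if not text or text == "undef":
--             return ""
--         cleaned = "".join(ch if ch.isalnum() else "_" for ch in text)
--         while "__" in cleaned:
--             cleaned = cleaned.replace("__", "_")
--         return cleaned.strip("_")
--
--     feature_token = _clean(feature)
--     scenario_token = _clean(scenario)
--     fallback_token = _clean(fallback_name) or "fault"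
--     tokens = ["fault", feature_token or fallback_token]
--     if scenario_token:
--         tokens.append(scenario_token)
--     return "_".join(tokens)
-- ===== SOURCE B (Python) =====
-- def _make_fault_group_name(feature, scenario, fallback_name="fault"):
--     """Create a stable LoopStructural feature name for a merged fault group."""
--
--     def _clean(value):
--         # single pass: emit alnum chars, inserting one '_' between runs
--         text = str(value).strip()
--         if not text or text == "undef":
--             return ""
--         res = []
--         sep_pending = False
--         for ch in text:
--             if ch.isalnum():
--                 if sep_pending and res:
--                     res.append("_")
--                 res.append(ch)
--                 sep_pending = False
--             elif res:
--                 sep_pending = True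
--         return "".join(res)
--
--     feature_token = _clean(feature)
--     scenario_token = _clean(scenario)
--     fallback_token = _clean(fallback_name) or "fault"
--     tokens = ["fault", feature_token or fallback_token]
--     if scenario_token:
--         tokens.append(scenario_token)
--     return "_".join(tokens)
-- ===== Notes on version B (the rewrite author's own statement) =====
-- stated objective: simpler
-- what changed: replaced _clean's substitute-string + 'while __ in s' collapse loop + strip('_') pipeline by a single pass over the characters with a pending-separator flag that emits alnum chars and one '_' between runs
import Mathlib
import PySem

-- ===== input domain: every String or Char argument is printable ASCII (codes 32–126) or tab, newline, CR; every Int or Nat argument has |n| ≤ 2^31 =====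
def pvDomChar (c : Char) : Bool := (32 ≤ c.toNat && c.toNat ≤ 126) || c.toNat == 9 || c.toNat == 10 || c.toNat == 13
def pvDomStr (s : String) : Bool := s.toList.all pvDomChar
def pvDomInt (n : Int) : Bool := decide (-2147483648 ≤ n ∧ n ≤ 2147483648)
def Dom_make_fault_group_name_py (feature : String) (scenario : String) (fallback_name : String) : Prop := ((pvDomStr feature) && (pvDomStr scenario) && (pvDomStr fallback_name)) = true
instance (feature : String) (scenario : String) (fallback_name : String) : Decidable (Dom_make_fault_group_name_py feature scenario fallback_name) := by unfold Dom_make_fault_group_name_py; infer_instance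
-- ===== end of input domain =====

-- B simplifies _clean to a single pass with a pending-separator flag instead of
-- substitution + a 'while "__" in s' collapse loop + strip('_'); proved equal on all inputs.

-- ===== PORT A =====
-- f used by A's '"".join(ch if ch.isalnum() else "_" for ch in text)'
def pvF (ch : Char) : Char := if PySem.Chars.isalnum ch then ch else '_'

-- exact hand port of '"__" in s' for the fixed two-char pattern "__"
def pvHasDD : List Char → Bool
  | [] => false
  | [_] => false
  | a :: b :: r => (a == '_' && b == '_') || pvHasDD (b :: r)

-- exact hand port of s.replace("__", "_") for this fixed pattern:
-- left-to-right, non-overlapping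
def pvRep : List Char → List Char
  | [] => []
  | [c] => [c]
  | a :: b :: r => if a == '_' && b == '_' then '_' :: pvRep r else a :: pvRep (b :: r)

theorem pvRep_length_le (s : List Char) : (pvRep s).length ≤ s.length := by
  induction s using pvRep.induct with
  | case1 => simp [pvRep]
  | case2 c => simp [pvRep]
  | case3 a b r hc ih => simp [pvRep, hc]; omega
  | case4 a b r hc ih => simp [pvRep, hc] at ih ⊢; omega

theorem pvRep_length_lt (s : List Char) (h : pvHasDD s = true) :
    (pvRep s).length < s.length := by
  induction s using pvRep.induct with
  | case1 => simp [pvHasDD] at h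
  | case2 c => simp [pvHasDD] at h
  | case3 a b r hc ih =>
      have := pvRep_length_le r
      simp [pvRep, hc]; omega
  | case4 a b r hc ih =>
      simp only [pvHasDD, hc, Bool.false_or] at h
      have := ih h
      simp [pvRep, hc] at this ⊢; omega

-- the 'while "__" in cleaned: cleaned = cleaned.replace("__", "_")' loop
def pvLoop (s : List Char) : List Char :=
  if h : pvHasDD s = true then pvLoop (pvRep s) else s
termination_by s.length
decreasing_by exact pvRep_length_lt s h

-- A's nested helper _clean (body after 'text = str(value).strip()')
def pvCleanACore (text : String) : String :=
  if text = "" || text = "undef" then ""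
  else String.ofList (PySem.Chars.stripChars (pvLoop (text.toList.map pvF)) ['_'])

def pvCleanA (value : String) : String := pvCleanACore (PySem.Str.strip value)

def make_fault_group_name_py (feature : String) (scenario : String) (fallback_name : String) : String :=
  let feature_token := pvCleanA feature
  let scenario_token := pvCleanA scenario
  let fallback_token := if pvCleanA fallback_name = "" then "fault" else pvCleanA fallback_name
  let tokens := ["fault", if feature_token = "" then fallback_token else feature_token]
  let tokens := if scenario_token = "" then tokens else tokens ++ [scenario_token]
  PySem.Str.join "_" tokens

-- ===== PORT B =====
-- the 'for ch in text' loop of B's _clean, state (res, sep_pending)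
def pvGoB (res : List Char) (need : Bool) : List Char → List Char
  | [] => res
  | c :: r =>
      if PySem.Chars.isalnum c then
        pvGoB ((if need && !res.isEmpty then res ++ ['_'] else res) ++ [c]) false r
      else
        pvGoB res (need || !res.isEmpty) r

-- B's nested helper _clean (body after 'text = str(value).strip()')
def pvCleanBCore (text : String) : String :=
  if text = "" || text = "undef" then ""
  else String.ofList (pvGoB [] false text.toList)

def pvCleanB (value : String) : String := pvCleanBCore (PySem.Str.strip value)

def make_fault_group_name_py_alt (feature : String) (scenario : String) (fallback_name : String) : String :=
  let feature_token := pvCleanB feature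
  let scenario_token := pvCleanB scenario
  let fallback_token := if pvCleanB fallback_name = "" then "fault" else pvCleanB fallback_name
  let tokens := ["fault", if feature_token = "" then fallback_token else feature_token]
  let tokens := if scenario_token = "" then tokens else tokens ++ [scenario_token]
  PySem.Str.join "_" tokens

-- ===== PRECONDITION & SPEC =====
def Spec_make_fault_group_name_py (feature : String) (scenario : String) (fallback_name : String) (out : String) : Prop := out = make_fault_group_name_py_alt feature scenario fallback_name
instance (feature : String) (scenario : String) (fallback_name : String) (out : String) : Decidable (Spec_make_fault_group_name_py feature scenario fallback_name out) := by unfold Spec_make_fault_group_name_py; infer_instance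

-- ===== CLAIM (what is proved, stated in full; the proofs are below) =====
def Claim_equal_make_fault_group_name_py : Prop := ∀ (feature : String) (scenario : String) (fallback_name : String), Dom_make_fault_group_name_py feature scenario fallback_name → Spec_make_fault_group_name_py feature scenario fallback_name (make_fault_group_name_py feature scenario fallback_name)

-- ===== LEMMAS AND PROOFS =====

-- canonical form: pvJk false s = the '_'-separated join of the maximal non-'_' runs of s
def pvJk : Bool → List Char → List Char
  | _, [] => []
  | false, c :: r => if c = '_' then pvJk false r else c :: pvJk true r
  | true, c :: r =>
      if c = '_' then (if pvJk false r = [] then [] else '_' :: pvJk false r)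
      else c :: pvJk true r

-- the predicate str.strip('_') drops, in normalized form
def pvQ : Char → Bool := fun x => x == '_'

theorem pvQ_eq : (fun x => (['_'] : List Char).contains x) = pvQ := by
  funext x; by_cases h : x = '_' <;> simp [pvQ, h]

theorem pvJk_false_eq_true (s : List Char) (h : s.head? ≠ some '_') :
    pvJk false s = pvJk true s := by
  cases s with
  | nil => rfl
  | cons c r => simp at h; simp [pvJk, h]

theorem pvJk_rep (s : List Char) : ∀ b, pvJk b (pvRep s) = pvJk b s := by
  induction s using pvRep.induct with
  | case1 => intro b; rfl
  | case2 c => intro b; rfl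
  | case3 a b r hc ih =>
      intro bb
      simp only [Bool.and_eq_true, beq_iff_eq] at hc
      obtain ⟨ha, hb⟩ := hc; subst ha; subst hb
      cases bb <;> simp [pvRep, pvJk, ih]
  | case4 a b r hc ih =>
      intro bb
      by_cases hA : a = '_'
      · subst hA
        have hB : ¬ b = '_' := by intro h; subst h; simp at hc
        cases bb <;> simp [pvRep, pvJk, hB, ih]
      · cases bb <;> simp [pvRep, hc, pvJk, hA, ih]

theorem pv_sR_cons (c : Char) (r : List Char) :
    ((c :: r).reverse.dropWhile pvQ).reverse =
      if (r.reverse.dropWhile pvQ).reverse = [] then (if c = '_' then [] else [c])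
      else c :: (r.reverse.dropWhile pvQ).reverse := by
  rw [List.reverse_cons, List.dropWhile_append]
  by_cases he : List.dropWhile pvQ r.reverse = []
  · rw [if_pos (by simp [he]), if_pos (by simp [he])]
    by_cases hc : c = '_'
    · subst hc; simp [List.dropWhile, pvQ]
    · have hb : (c == '_') = false := by simp [hc]
      simp [List.dropWhile, pvQ, hb, hc]
  · rw [if_neg (by simp [he]), if_neg (by simp [he]), List.reverse_append]
    simp

theorem pvHasDD_tail {c : Char} {r : List Char} (h : pvHasDD (c :: r) = false) :
    pvHasDD r = false := by
  cases r with
  | nil => rfl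
  | cons b t => simp only [pvHasDD] at h; exact (Bool.or_eq_false_iff.mp h).2

theorem pvHasDD_head {r : List Char} (h : pvHasDD ('_' :: r) = false) :
    r.head? ≠ some '_' := by
  cases r with
  | nil => simp
  | cons b t =>
      simp only [pvHasDD] at h
      have := (Bool.or_eq_false_iff.mp h).1
      simp at this ⊢
      exact this

-- right strip = pvJk true on strings without "__"
theorem pv_sR_eq_jk (s : List Char) (h : pvHasDD s = false) :
    (s.reverse.dropWhile pvQ).reverse = pvJk true s := by
  induction s with
  | nil => rfl
  | cons c r ih =>
      have hr := pvHasDD_tail h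
      rw [pv_sR_cons, ih hr]
      by_cases hc : c = '_'
      · subst hc
        have hhd := pvHasDD_head h
        have hft := pvJk_false_eq_true r hhd
        simp [pvJk, hft]
      · simp only [pvJk, if_neg hc]
        split
        · next hnil => rw [hnil]
        · rfl

-- full strip('_') = pvJk false on strings without "__"
theorem pv_strip_eq_jk (s : List Char) (h : pvHasDD s = false) :
    PySem.Chars.stripChars s ['_'] = pvJk false s := by
  simp only [PySem.Chars.stripChars, pvQ_eq]
  cases s with
  | nil => rfl
  | cons c r =>
      by_cases hc : c = '_'
      · subst hc
        have hr := pvHasDD_tail h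
        have hhd := pvHasDD_head h
        have hdrop : List.dropWhile pvQ ('_' :: r) = r := by
          cases r with
          | nil => simp [List.dropWhile, pvQ]
          | cons b t =>
              simp at hhd
              have hbf : (b == '_') = false := by simp [hhd]
              simp [List.dropWhile, pvQ, hbf]
        rw [hdrop, pv_sR_eq_jk r hr]
        have hft := pvJk_false_eq_true r hhd
        simp [pvJk, hft]
      · have hdrop : List.dropWhile pvQ (c :: r) = c :: r := by
          have hbf : (c == '_') = false := by simp [hc]
          simp [List.dropWhile, pvQ, hbf]
        rw [hdrop, pv_sR_eq_jk (c :: r) h]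
        exact (pvJk_false_eq_true (c :: r) (by simp [hc])).symm

theorem pvLoop_strip (s : List Char) :
    PySem.Chars.stripChars (pvLoop s) ['_'] = pvJk false s := by
  induction s using pvLoop.induct with
  | case1 s h ih =>
      rw [pvLoop, dif_pos h, ih]
      exact pvJk_rep s false
  | case2 s h =>
      rw [pvLoop, dif_neg h]
      exact pv_strip_eq_jk s (by simpa using h)

theorem pv_alnum_ne_underscore (c : Char) (h : PySem.Chars.isalnum c = true) : ¬ c = '_' := by
  intro hc; subst hc
  have : PySem.Chars.isalnum '_' = false := by decide
  simp [this] at h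

theorem pvGoB_spec (cs : List Char) : ∀ (res : List Char) (need : Bool),
    pvGoB res need cs =
      if res = [] then pvJk false (cs.map pvF)
      else res ++ pvJk true ((if need then ['_'] else []) ++ cs.map pvF) := by
  induction cs with
  | nil =>
      intro res need
      cases need <;> by_cases hr : res = [] <;> simp [pvGoB, pvJk, hr]
  | cons c r ih =>
      intro res need
      by_cases ha : PySem.Chars.isalnum c = true
      · have hne : ¬ c = '_' := pv_alnum_ne_underscore c ha
        have hf : pvF c = c := by simp [pvF, ha]
        simp only [pvGoB, if_pos ha]
        rw [ih]
        by_cases hr : res = []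
        · subst hr
          cases need <;> simp [pvJk, hne, hf]
        · cases need <;> simp [hr, pvJk, hne, hf]
      · have hf : pvF c = '_' := by simp [pvF, ha]
        simp only [pvGoB, if_neg ha]
        rw [ih]
        by_cases hr : res = []
        · subst hr; simp [pvJk, hf]
        · cases need <;> simp [hr, pvJk, hf]

theorem pvCleanA_eq_pvCleanB (v : String) : pvCleanA v = pvCleanB v := by
  unfold pvCleanA pvCleanB pvCleanACore pvCleanBCore
  split
  · rfl
  · rw [pvGoB_spec, if_pos rfl, pvLoop_strip]

-- ===== VERDICT (by name: the statement is the Claim_ definition above) =====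
theorem make_fault_group_name_py_spec : Claim_equal_make_fault_group_name_py := by
  intro feature scenario fallback_name _
  unfold Spec_make_fault_group_name_py
  unfold make_fault_group_name_py make_fault_group_name_py_alt
  simp only [pvCleanA_eq_pvCleanB]
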